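-- pv_equiv track=rewrite | github.com/hmnhGeek/Data-Structures-Algorithms | Python/Practice Set 2/Dynamic Programming/DP45 - Longest String Chain.py | chain_possible
-- ===== SOURCE A (Python) =====
-- def chain_possible(x, y):
--     if len(x) != len(y) + 1:
--         return False
--     i, j = 0, 0
--     while i < len(x):
--         if 0 <= j < len(y) and x[i] == y[j]:
--             j += 1
--         i += 1
--     return i == len(x) and j == len(y)
-- ===== SOURCE B (Python) =====
-- def chain_possible(x, y):
--     if len(x) != len(y) + 1:
--         return False
--     for i in range(len(y)):
--         if x[i] != y[i]:
--             return x[i+1:] == y[i:]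
--     return True
-- ===== Notes on version B (the rewrite author's own statement) =====
-- stated objective: idiomatic
-- what changed: Replaces the two-pointer greedy subsequence counter with a find-first-mismatch loop that compares the remaining suffixes by slicing (x[i+1:] == y[i:]).
import Mathlib
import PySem

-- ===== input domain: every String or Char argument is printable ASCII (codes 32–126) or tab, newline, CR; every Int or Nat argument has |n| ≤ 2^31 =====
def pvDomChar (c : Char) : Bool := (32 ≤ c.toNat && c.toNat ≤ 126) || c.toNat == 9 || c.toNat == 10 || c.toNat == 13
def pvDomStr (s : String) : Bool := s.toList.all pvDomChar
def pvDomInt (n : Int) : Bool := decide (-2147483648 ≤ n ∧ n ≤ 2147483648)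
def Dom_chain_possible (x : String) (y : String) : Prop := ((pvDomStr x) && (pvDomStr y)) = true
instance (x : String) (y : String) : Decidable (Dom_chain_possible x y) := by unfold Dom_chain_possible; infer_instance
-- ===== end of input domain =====

-- B finds the first mismatch and compares the remaining suffixes instead of A's
-- greedy two-pointer subsequence count; same O(n) cost, more idiomatic.


-- ===== PORT A =====
-- one step of A's while loop body: i advances along xs (the foldl), j is the
-- explicit state; the guard `0 <= j < len(y)` becomes the bounds check on ys[j]
def aStep (ys : List Char) (j : Nat) (c : Char) : Nat :=
  if h : j < ys.length then (if c = ys[j] then j + 1 else j) else j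

def chain_possible (x : String) (y : String) : Bool :=
  let xs := x.toList
  let ys := y.toList
  if xs.length ≠ ys.length + 1 then false
  else
    -- while i < len(x): … ; after the loop i = len(x), so `i == len(x)` is True
    let j := xs.foldl (aStep ys) 0
    (xs.length == xs.length) && (j == ys.length)

-- ===== PORT B =====
-- for i in range(len(y)): first mismatch → compare x[i+1:] with y[i:]; no mismatch → True
def altGo : List Char → List Char → Bool
  | _, [] => true
  | [], _ :: _ => true   -- unreachable under the len(x) = len(y)+1 guard
  | c :: cs, d :: ds => if c = d then altGo cs ds else cs == d :: ds

def chain_possible_alt (x : String) (y : String) : Bool :=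
  if x.toList.length ≠ y.toList.length + 1 then false
  else altGo x.toList y.toList

-- ===== PRECONDITION & SPEC =====
def Spec_chain_possible (x : String) (y : String) (out : Bool) : Prop := out = chain_possible_alt x y
instance (x : String) (y : String) (out : Bool) : Decidable (Spec_chain_possible x y out) := by unfold Spec_chain_possible; infer_instance

-- ===== CLAIM (what is proved, stated in full; the proofs are below) =====
def Claim_equal_chain_possible : Prop := ∀ (x : String) (y : String), Dom_chain_possible x y → Spec_chain_possible x y (chain_possible x y)

-- ===== LEMMAS AND PROOFS =====

-- greedy subsequence-match count (A's j, rephrased as consuming the ys suffix)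
def greedy : List Char → List Char → Nat
  | [], _ => 0
  | _ :: _, [] => 0
  | c :: cs, d :: ds => if c = d then greedy cs ds + 1 else greedy cs (d :: ds)

theorem greedy_nil (xs : List Char) : greedy xs [] = 0 := by
  cases xs <;> simp [greedy]

theorem greedy_le (xs ys : List Char) : greedy xs ys ≤ xs.length := by
  induction xs generalizing ys with
  | nil => simp [greedy]
  | cons c cs ih =>
    cases ys with
    | nil => simp [greedy]
    | cons d ds =>
      simp only [greedy, List.length_cons]
      split
      · exact Nat.succ_le_succ (ih ds)
      · exact Nat.le_succ_of_le (ih (d :: ds))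

-- A's foldl from state j equals j + greedy of xs against the suffix ys.drop j
theorem foldl_aStep (ys : List Char) (xs : List Char) (j : Nat) (hj : j ≤ ys.length) :
    xs.foldl (aStep ys) j = j + greedy xs (ys.drop j) := by
  induction xs generalizing j with
  | nil => simp [greedy]
  | cons c cs ih =>
    by_cases h : j < ys.length
    · have hdrop : ys.drop j = ys[j] :: ys.drop (j + 1) := List.drop_eq_getElem_cons h
      by_cases hc : c = ys[j]
      · have : aStep ys j c = j + 1 := by simp [aStep, h, hc]
        rw [List.foldl_cons, this, ih (j + 1) h, hdrop]
        simp [greedy, hc]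
        omega
      · have : aStep ys j c = j := by simp [aStep, h, hc]
        rw [List.foldl_cons, this, ih j hj, hdrop]
        simp [greedy, hc]
    · have hjlen : j = ys.length := le_antisymm hj (not_lt.mp h)
      have : aStep ys j c = j := by simp [aStep, h]
      rw [List.foldl_cons, this, ih j hj]
      have hnil : ys.drop j = [] := by simp [hjlen]
      simp [hnil, greedy_nil]

-- at equal lengths, a full greedy match means the lists are equal
theorem greedy_full_eq (xs ys : List Char) (hlen : xs.length = ys.length) :
    greedy xs ys = ys.length ↔ xs = ys := by
  induction xs generalizing ys with
  | nil =>
    cases ys with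
    | nil => simp [greedy]
    | cons d ds => simp at hlen
  | cons c cs ih =>
    cases ys with
    | nil => simp at hlen
    | cons d ds =>
      simp only [List.length_cons] at hlen
      have hlen' : cs.length = ds.length := Nat.succ_injective hlen
      by_cases hc : c = d
      · simp only [greedy, List.length_cons, hc]
        constructor
        · intro h
          have := (ih ds hlen').mp (Nat.succ_injective h)
          simp [this]
        · intro h
          have : cs = ds := by injection h
          simp [(ih ds hlen').mpr this]
      · simp only [greedy, if_neg hc, List.length_cons]
        have hle : greedy cs (d :: ds) ≤ cs.length := greedy_le cs (d :: ds)
        constructor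
        · intro h; omega
        · intro h
          have : c = d := by injection h
          exact absurd this hc
  
-- with |xs| = |ys| + 1, full greedy match ↔ B's first-mismatch test
theorem greedy_iff_altGo (ys xs : List Char) (hlen : xs.length = ys.length + 1) :
    (greedy xs ys = ys.length) ↔ altGo xs ys = true := by
  induction ys generalizing xs with
  | nil =>
    cases xs with
    | nil => simp at hlen
    | cons c cs => simp [greedy, altGo]
  | cons d ds ih =>
    cases xs with
    | nil => simp at hlen
    | cons c cs =>
      simp only [List.length_cons] at hlen
      have hlen' : cs.length = ds.length + 1 := Nat.succ_injective hlen
      by_cases hc : c = d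
      · simp only [greedy, altGo, if_pos hc, List.length_cons]
        rw [← ih cs hlen']
        omega
      · simp only [greedy, altGo, if_neg hc, List.length_cons]
        have heq := greedy_full_eq cs (d :: ds) (by simpa using hlen')
        simp only [List.length_cons] at heq
        rw [heq]
        simp

-- ===== VERDICT (by name: the statement is the Claim_ definition above) =====
theorem chain_possible_spec : Claim_equal_chain_possible := by
  intro x y _
  unfold Spec_chain_possible chain_possible chain_possible_alt
  by_cases h : x.toList.length = y.toList.length + 1
  · rw [if_neg (by omega), if_neg (by omega)]
    rw [foldl_aStep y.toList x.toList 0 (Nat.zero_le _), List.drop_zero, Nat.zero_add]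
    have hiff := greedy_iff_altGo y.toList x.toList h
    simp only [beq_self_eq_true, Bool.true_and]
    by_cases hg : greedy x.toList y.toList = y.toList.length
    · simp [hg, hiff.mp hg]
    · have halt : altGo x.toList y.toList = false := by
        cases hb : altGo x.toList y.toList
        · rfl
        · exact absurd (hiff.mpr hb) hg
      simp only [halt]
      simpa using hg
  · rw [if_pos (by omega), if_pos (by omega)]
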